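-- pv_equiv track=rewrite | github.com/vslch/google-kickstart | 2020-round-A/bundling.py | solution
-- ===== SOURCE A (Python) =====
-- def commonPrefix(a, b):
-- 	m = min(len(a), len(b))
-- 	r = next((i for i in range(m) if a[i] != b[i]), m)
-- 	return r
--
-- def solution(N, K, S):
--
-- 	if K == 1:
-- 		return sum(len(x) for x in S)
--
-- 	S = sorted(S)
-- 	X = [0] * (N + 1)
--
-- 	for i in range(1, N):
-- 		X[i] = commonPrefix(S[i - 1], S[i])
--
-- 	maxRank = max(X)
-- 	score = 0
--
-- 	for rank in range(1, maxRank + 1):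
-- 		counter = 0
-- 		state = 0
-- 		for idx in range(1, N + 1):
-- 			if state == 0:
-- 				if X[idx] >= rank:
-- 					counter = 2
-- 					state = 1
-- 				else:
-- 					state = 0
-- 			elif state == 1:
-- 				if X[idx] >= rank:
-- 					counter += 1
-- 					state = 1
-- 				else:
-- 					score += counter // K
-- 					state = 0
--
-- 	return score
-- ===== SOURCE B (Python) =====
-- def solution(N, K, S):
--     if K == 1:
--         return sum(len(x) for x in S)
--     counts = {}
--     for s in sorted(S)[:N]:
--         for i in range(1, len(s) + 1):
--             p = s[:i]
--             counts[p] = counts.get(p, 0) + 1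
--     return sum(c // K for c in counts.values() if c >= 2)
-- ===== Notes on version B (the rewrite author's own statement) =====
-- stated objective: alternative
-- what changed: A sorts, builds the adjacent-LCP array and re-scans it once per rank with a counter/state machine; B instead counts, in a single pass over the first N sorted strings, how many carry each prefix (a dict of trie-node counts) and sums count//K over the shared prefixes (count >= 2, the only ones the rank scan ever credits), eliminating the per-rank scans.
import Mathlib
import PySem

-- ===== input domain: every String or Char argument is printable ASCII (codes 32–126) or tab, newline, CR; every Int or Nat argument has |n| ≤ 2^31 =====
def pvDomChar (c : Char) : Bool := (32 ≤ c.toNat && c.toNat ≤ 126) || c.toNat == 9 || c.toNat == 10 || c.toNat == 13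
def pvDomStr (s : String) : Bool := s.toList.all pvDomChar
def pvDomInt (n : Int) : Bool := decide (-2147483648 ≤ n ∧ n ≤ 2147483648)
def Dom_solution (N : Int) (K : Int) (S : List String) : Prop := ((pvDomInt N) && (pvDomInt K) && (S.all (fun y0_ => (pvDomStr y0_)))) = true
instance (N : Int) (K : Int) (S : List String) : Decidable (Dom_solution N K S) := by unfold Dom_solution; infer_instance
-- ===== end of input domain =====

-- B replaces A's per-rank scans of the adjacent-LCP array by one dict counting, per prefix,
-- how many of the first N sorted strings carry it, summing count // K over the shared
-- prefixes (count >= 2, the only ones A's rank scan ever credits).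

-- ===== PORT A =====
-- helper commonPrefix: first index i with a[i] != b[i], else min(len(a), len(b))
def commonPrefixAux : List Char → List Char → Int
  | a :: as, b :: bs => if a ≠ b then 0 else 1 + commonPrefixAux as bs
  | _, _ => 0

def commonPrefix (a b : String) : Int := commonPrefixAux a.toList b.toList

def solution (N : Int) (K : Int) (S : List String) : Int :=
  if K = 1 then S.foldl (fun acc x => acc + PySem.Str.len x) 0
  else
    let S' := PySem.List.sorted S id
    let X0 : List Int := List.replicate (N + 1).toNat 0
    let X := (PySem.List.pyRange 1 N 1).foldl (fun A i =>
      PySem.List.pySetD A i (commonPrefix (PySem.List.pyGetD S' (i - 1) "") (PySem.List.pyGetD S' i ""))) X0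
    let maxRank := (PySem.List.max? X id).getD 0
    (PySem.List.pyRange 1 (maxRank + 1) 1).foldl (fun score rank =>
      ((PySem.List.pyRange 1 (N + 1) 1).foldl
        (fun (st : Int × Int × Int) idx =>
          if st.2.2 = 0 then
            (if rank ≤ PySem.List.pyGetD X idx 0 then (st.1, 2, 1) else (st.1, st.2.1, 0))
          else
            (if rank ≤ PySem.List.pyGetD X idx 0 then (st.1, st.2.1 + 1, 1)
             else (st.1 + PySem.Int.floordiv st.2.1 K, st.2.1, 0)))
        (score, 0, 0)).1) 0

-- ===== PORT B =====
def solution_alt (N : Int) (K : Int) (S : List String) : Int :=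
  if K = 1 then S.foldl (fun acc x => acc + PySem.Str.len x) 0
  else
    let T := PySem.List.slice (PySem.List.sorted S id) none (some N)
    let counts := T.foldl (fun d s =>
      (PySem.List.pyRange 1 (PySem.Str.len s + 1) 1).foldl (fun d i =>
        d.insert (PySem.Str.slice s none (some i))
          (d.getD (PySem.Str.slice s none (some i)) 0 + 1)) d) PySem.Dict.empty
    counts.values.foldl (fun acc c => if 2 ≤ c then acc + PySem.Int.floordiv c K else acc) 0

-- ===== PRECONDITION & SPEC =====
-- Pre_ excludes only inputs on which A RAISES: N < 0 (max([]) ValueError) or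
-- 2 ≤ N > len(S) (IndexError while building X), and K = 0 when two of the first N sorted
-- strings share a first character (ZeroDivisionError as soon as a rank run ends; when no
-- two share a first character A returns 0 with K = 0, and those inputs stay inside Pre_).
def Pre_solution (N : Int) (K : Int) (S : List String) : Prop :=
  K = 1 ∨ (0 ≤ N ∧ (N ≤ (S.length : Int) ∨ N ≤ 1) ∧
    (K ≠ 0 ∨ (((PySem.List.sorted S id).take N.toNat).filterMap (fun s => s.toList.head?)).Nodup))
instance (N : Int) (K : Int) (S : List String) : Decidable (Pre_solution N K S) := by
  unfold Pre_solution; infer_instance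

def pvWitness_solution : Int × Int × List String := (3, 2, ["ab", "ac", "b"])

def Spec_solution (N : Int) (K : Int) (S : List String) (out : Int) : Prop := out = solution_alt N K S
instance (N : Int) (K : Int) (S : List String) (out : Int) : Decidable (Spec_solution N K S out) := by
  unfold Spec_solution; infer_instance

-- ===== CLAIM (what is proved, stated in full; the proofs are below) =====
def Claim_equal_solution : Prop := ∀ (N : Int) (K : Int) (S : List String),
  Dom_solution N K S → Pre_solution N K S → Spec_solution N K S (solution N K S)

-- ===== LEMMAS AND PROOFS =====

-- ---------- basic objects ----------

/-- `contrib K c`: what a bundle-candidate of multiplicity `c` contributes (shared only). -/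
def contrib (K c : Int) : Int := if 2 ≤ c then PySem.Int.floordiv c K else 0

/-- `longB r s`: the string has at least `r` characters. -/
def longB (r : Int) (s : String) : Bool := decide (r ≤ (s.toList.length : Int))

/-- `samePreB r a b`: both strings have ≥ r chars and agree on the first r chars. -/
def samePreB (r : Int) (a b : String) : Bool :=
  longB r a && longB r b && decide (a.toList.take r.toNat = b.toList.take r.toNat)

/-- adjacent LCP list of a list of strings. -/
def lcps : List String → List Int
  | a :: b :: t => commonPrefix a b :: lcps (b :: t)
  | _ => []

/-- clean reformulation of A's per-rank state machine; `some c` = inside a run with counter `c`. -/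
def machRec (K r : Int) : Option Int → List Int → Int
  | _, [] => 0
  | none, x :: xs => if r ≤ x then machRec K r (some 2) xs else machRec K r none xs
  | some c, x :: xs =>
      if r ≤ x then machRec K r (some (c + 1)) xs
      else PySem.Int.floordiv c K + machRec K r none xs

/-- group sum at depth r: leading block of strings sharing the head's r-prefix;
only blocks of size ≥ 2 contribute (A's machine never counts singletons). -/
def grpSum (K r : Int) : List String → Int
  | [] => 0
  | s :: t =>
      contrib K (((t.takeWhile (samePreB r s)).length : Int) + 1) +
        grpSum K r (t.dropWhile (samePreB r s))
  termination_by l => l.length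
  decreasing_by
    simp only [List.length_cons]
    have := List.length_dropWhile_le (p := samePreB r s) (l := t)
    omega

/-- the r-prefix of a string, as B computes it. -/
def pf (r : Int) (s : String) : String := PySem.Str.slice s none (some r)

/-- all length-r prefixes taken from strings of T that are long enough. -/
def Lr (r : Int) (T : List String) : List String := (T.filter (longB r)).map (pf r)

/-- B's per-string prefix stream. -/
def prefs (s : String) : List String :=
  (PySem.List.pyRange 1 (PySem.Str.len s + 1) 1).map (fun i => PySem.Str.slice s none (some i))

/-- sum of contrib(count) over the distinct elements of L. -/
def SK (K : Int) (L : List String) : Int :=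
  ((PySem.Set.ofList L).map (fun k => contrib K (L.count k : Int))).sum

-- ---------- tiny arithmetic ----------

lemma contrib_one (K : Int) : contrib K 1 = 0 := by norm_num [contrib]

lemma contrib_big (K c : Int) (h : 2 ≤ c) : contrib K c = PySem.Int.floordiv c K := by
  rw [contrib, if_pos h]

-- ---------- commonPrefix ----------

lemma cpAux_nil_left (b : List Char) : commonPrefixAux [] b = 0 := by cases b <;> rfl

lemma cpAux_nil_right (a : List Char) : commonPrefixAux a [] = 0 := by cases a <;> rfl

lemma cpAux_cons (x y : Char) (as bs : List Char) :
    commonPrefixAux (x :: as) (y :: bs) = if x ≠ y then 0 else 1 + commonPrefixAux as bs := rfl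

lemma cpAux_nonneg (a : List Char) : ∀ b, 0 ≤ commonPrefixAux a b := by
  induction a with
  | nil => intro b; rw [cpAux_nil_left]
  | cons x as ih =>
      intro b
      cases b with
      | nil => rw [cpAux_nil_right]
      | cons y bs =>
          rw [cpAux_cons]
          split
          · exact le_refl 0
          · have := ih bs; omega

lemma cpAux_le_len (a : List Char) : ∀ b, commonPrefixAux a b ≤ (a.length : Int) := by
  induction a with
  | nil => intro b; rw [cpAux_nil_left]; simp
  | cons x as ih =>
      intro b
      cases b with
      | nil => rw [cpAux_nil_right]; positivity
      | cons y bs =>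
          rw [cpAux_cons]
          split
          · simp; positivity
          · have := ih bs; simp only [List.length_cons]; push_cast; omega

lemma cp_ge_iff_nat (a : List Char) : ∀ (b : List Char) (n : Nat),
    ((n : Int) ≤ commonPrefixAux a b) ↔ (a.take n = b.take n ∧ n ≤ a.length ∧ n ≤ b.length) := by
  induction a with
  | nil =>
      intro b n
      rw [cpAux_nil_left]
      constructor
      · intro h
        have : n = 0 := by omega
        subst this; simp
      · rintro ⟨-, h2, -⟩
        simp at h2; subst h2; simp
  | cons x as ih =>
      intro b n
      cases b with
      | nil =>
          rw [cpAux_nil_right]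
          constructor
          · intro h
            have : n = 0 := by omega
            subst this; simp
          · rintro ⟨-, -, h3⟩
            simp at h3; subst h3; simp
      | cons y bs =>
          rw [cpAux_cons]
          by_cases hxy : x = y
          · subst hxy
            rw [if_neg (by simp)]
            cases n with
            | zero =>
                simp
                have := cpAux_nonneg as bs; omega
            | succ m =>
                have := ih bs m
                simp only [List.take_succ_cons, List.length_cons]
                push_cast
                constructor
                · intro h
                  have hm : (m : Int) ≤ commonPrefixAux as bs := by omega
                  obtain ⟨h1, h2, h3⟩ := this.1 hm
                  exact ⟨by rw [h1], by omega, by omega⟩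
                · rintro ⟨h1, h2, h3⟩
                  simp only [List.cons.injEq] at h1
                  have := this.2 ⟨h1.2, by omega, by omega⟩
                  omega
          · rw [if_pos (by exact hxy)]
            constructor
            · intro h
              have : n = 0 := by omega
              subst this; simp
            · rintro ⟨h1, h2, h3⟩
              cases n with
              | zero => simp
              | succ m =>
                  simp only [List.take_succ_cons, List.cons.injEq] at h1
                  exact absurd h1.1 hxy

lemma cp_ge_iff (a b : String) (r : Int) (hr : 0 ≤ r) :
    (r ≤ commonPrefix a b) ↔ samePreB r a b = true := by
  obtain ⟨n, rfl⟩ : ∃ n : Nat, r = (n : Int) := ⟨r.toNat, (Int.toNat_of_nonneg hr).symm⟩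
  unfold samePreB longB commonPrefix
  simp only [Int.toNat_natCast, Bool.and_eq_true, decide_eq_true_eq]
  rw [cp_ge_iff_nat]
  constructor
  · rintro ⟨h1, h2, h3⟩
    exact ⟨⟨by exact_mod_cast h2, by exact_mod_cast h3⟩, h1⟩
  · rintro ⟨⟨h2, h3⟩, h1⟩
    exact ⟨h1, by exact_mod_cast h2, by exact_mod_cast h3⟩

lemma samePreB_iff (r : Int) (a b : String) :
    samePreB r a b = true ↔
      (r ≤ (a.toList.length : Int) ∧ r ≤ (b.toList.length : Int) ∧
        a.toList.take r.toNat = b.toList.take r.toNat) := by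
  unfold samePreB longB
  simp only [Bool.and_eq_true, decide_eq_true_eq]
  tauto

lemma samePre_congr {r : Int} {a b : String} (h : samePreB r a b = true) (x : String) :
    samePreB r a x = samePreB r b x := by
  obtain ⟨ha, hb, hab⟩ := (samePreB_iff r a b).1 h
  unfold samePreB longB
  rw [hab, decide_eq_true ha, decide_eq_true hb]

-- ---------- lcps ----------

lemma lcps_length : ∀ l : List String, (lcps l).length = l.length - 1
  | [] => rfl
  | [_] => rfl
  | a :: b :: t => by
      have := lcps_length (b :: t)
      simp only [lcps, List.length_cons] at *
      omega

lemma lcps_append_singleton : ∀ (l : List String) (h : l ≠ []) (x : String),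
    lcps (l ++ [x]) = lcps l ++ [commonPrefix (l.getLast h) x]
  | [a], _, x => rfl
  | a :: b :: t, _, x => by
      have := lcps_append_singleton (b :: t) (by simp) x
      simp only [List.cons_append, lcps] at *
      rw [this]
      simp [List.getLast_cons]

-- ---------- grpSum equations ----------

lemma grpSum_nil (K r : Int) : grpSum K r [] = 0 := by simp [grpSum]

lemma grpSum_cons (K r : Int) (s : String) (t : List String) :
    grpSum K r (s :: t) =
      contrib K (((t.takeWhile (samePreB r s)).length : Int) + 1) +
        grpSum K r (t.dropWhile (samePreB r s)) := by
  rw [grpSum]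

-- ---------- the state machine as a fold ----------

lemma fold_mach (K rank : Int) (f : Int × Int × Int → Int → Int × Int × Int)
    (hf : ∀ st x, f st x =
      if st.2.2 = 0 then (if rank ≤ x then (st.1, 2, 1) else (st.1, st.2.1, 0))
      else if rank ≤ x then (st.1, st.2.1 + 1, 1)
      else (st.1 + PySem.Int.floordiv st.2.1 K, st.2.1, 0)) :
    ∀ xs : List Int,
      (∀ s c : Int, (xs.foldl f (s, c, 0)).1 = s + machRec K rank none xs) ∧
      (∀ s c : Int, (xs.foldl f (s, c, 1)).1 = s + machRec K rank (some c) xs) := by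
  intro xs
  induction xs with
  | nil => refine ⟨fun s c => ?_, fun s c => ?_⟩ <;> simp [machRec]
  | cons x xs ih =>
      constructor
      · intro s c
        rw [List.foldl_cons, hf]
        by_cases hx : rank ≤ x
        · simp only [machRec, if_pos hx]
          norm_num
          exact ih.2 s 2
        · simp only [machRec, if_neg hx]
          norm_num
          exact ih.1 s c
      · intro s c
        rw [List.foldl_cons, hf]
        by_cases hx : rank ≤ x
        · simp only [machRec, if_pos hx]
          norm_num
          exact ih.2 s (c + 1)
        · simp only [machRec, if_neg hx]
          norm_num
          rw [ih.1 (s + PySem.Int.floordiv c K) c]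
          ring

-- ---------- machine ↔ grpSum ----------

lemma machRec_eq_grpSum (K r : Int) (hr : 1 ≤ r) :
    ∀ (T : List String), machRec K r none (lcps T ++ [0]) = grpSum K r T := by
  have hr0 : ¬ (r ≤ (0 : Int)) := by omega
  suffices H : ∀ n : Nat,
      (∀ T : List String, T.length ≤ n → machRec K r none (lcps T ++ [0]) = grpSum K r T) ∧
      (∀ t : List String, t.length < n → ∀ (prev : String) (c : Int),
        machRec K r (some c) (lcps (prev :: t) ++ [0]) =
          PySem.Int.floordiv (c + ((t.takeWhile (samePreB r prev)).length : Int)) K +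
            grpSum K r (t.dropWhile (samePreB r prev))) by
    intro T; exact (H T.length).1 T le_rfl
  intro n
  induction n with
  | zero =>
      refine ⟨?_, ?_⟩
      · intro T hT
        obtain rfl : T = [] := List.eq_nil_of_length_eq_zero (Nat.le_zero.mp hT)
        simp [lcps, machRec, hr0, grpSum_nil]
      · intro t ht; exact absurd ht (by omega)
  | succ n ih =>
      refine ⟨?_, ?_⟩
      · intro T hT
        match T with
        | [] => simp [lcps, machRec, hr0, grpSum_nil]
        | [s] =>
            rw [grpSum_cons]
            simp [lcps, machRec, hr0, grpSum_nil, contrib_one]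
        | s :: u :: t =>
            have hd : lcps (s :: u :: t) = commonPrefix s u :: lcps (u :: t) := rfl
            rw [hd, grpSum_cons]
            by_cases hrel : r ≤ commonPrefix s u
            · have hsp : samePreB r s u = true := (cp_ge_iff s u r (by omega)).1 hrel
              have hfun : samePreB r s = samePreB r u := funext (samePre_congr hsp)
              simp only [List.cons_append, machRec, if_pos hrel]
              rw [ih.2 t (by simp at hT; omega) u 2]
              rw [List.takeWhile_cons_of_pos hsp, List.dropWhile_cons_of_pos hsp, hfun]
              simp only [List.length_cons, Nat.cast_add, Nat.cast_one]
              rw [contrib_big K _ (by omega)]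
              rw [show ∀ m : Int, m + 1 + 1 = 2 + m from fun m => by ring]
            · have hsp : samePreB r s u = false := by
                rw [← Bool.not_eq_true]; intro hc
                exact hrel ((cp_ge_iff s u r (by omega)).2 hc)
              simp only [List.cons_append, machRec, if_neg hrel]
              rw [ih.1 (u :: t) (by simp at hT ⊢; omega)]
              rw [List.takeWhile_cons_of_neg (by simp [hsp]), List.dropWhile_cons_of_neg (by simp [hsp])]
              simp [contrib_one]
      · intro t ht prev c
        match t with
        | [] =>
            simp [lcps, machRec, hr0, grpSum_nil]
        | u :: t' =>
            have hd : lcps (prev :: u :: t') = commonPrefix prev u :: lcps (u :: t') := rfl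
            rw [hd]
            by_cases hrel : r ≤ commonPrefix prev u
            · have hsp : samePreB r prev u = true := (cp_ge_iff prev u r (by omega)).1 hrel
              have hfun : samePreB r prev = samePreB r u := funext (samePre_congr hsp)
              simp only [List.cons_append, machRec, if_pos hrel]
              rw [ih.2 t' (by simp at ht; omega) u (c + 1)]
              rw [List.takeWhile_cons_of_pos hsp, List.dropWhile_cons_of_pos hsp, hfun]
              simp only [List.length_cons, Nat.cast_add, Nat.cast_one]
              rw [show ∀ a m : Int, a + (m + 1) = a + 1 + m from fun a m => by ring]
            · have hsp : samePreB r prev u = false := by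
                rw [← Bool.not_eq_true]; intro hc
                exact hrel ((cp_ge_iff prev u r (by omega)).2 hc)
              simp only [List.cons_append, machRec, if_neg hrel]
              rw [ih.1 (u :: t') (by simp at ht ⊢; omega)]
              rw [List.takeWhile_cons_of_neg (by simp [hsp]), List.dropWhile_cons_of_neg (by simp [hsp])]
              simp

lemma grpSum_zero (K r : Int) (hr : 1 ≤ r) :
    ∀ (T : List String), (∀ x ∈ lcps T, x < r) → grpSum K r T = 0 := by
  suffices H : ∀ (n : Nat) (T : List String), T.length ≤ n →
      (∀ x ∈ lcps T, x < r) → grpSum K r T = 0 by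
    intro T; exact H T.length T le_rfl
  intro n
  induction n with
  | zero =>
      intro T hT _
      obtain rfl : T = [] := List.eq_nil_of_length_eq_zero (Nat.le_zero.mp hT)
      exact grpSum_nil K r
  | succ n ih =>
      intro T hT hx
      match T with
      | [] => exact grpSum_nil K r
      | [s] => rw [grpSum_cons]; simp [contrib_one, grpSum_nil]
      | s :: u :: t =>
          have hd : lcps (s :: u :: t) = commonPrefix s u :: lcps (u :: t) := rfl
          rw [hd] at hx
          have hcp : commonPrefix s u < r := hx _ (List.mem_cons_self ..)
          have hsp : samePreB r s u = false := by
            rw [← Bool.not_eq_true]; intro hc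
            have := (cp_ge_iff s u r (by omega)).2 hc
            omega
          rw [grpSum_cons, List.takeWhile_cons_of_neg (by simp [hsp]),
            List.dropWhile_cons_of_neg (by simp [hsp])]
          rw [ih (u :: t) (by simp at hT ⊢; omega) (fun x hx' => hx x (List.mem_cons_of_mem _ hx'))]
          simp [contrib_one]

-- ---------- prefixes ----------

lemma pf_toList (r : Int) (s : String) (hr : 0 ≤ r) :
    (pf r s).toList = s.toList.take r.toNat := by
  unfold pf
  rw [PySem.Str.toList_slice, PySem.Chars.slice_eq_listSlice, PySem.List.slice_to _ hr]

lemma mem_Lr_length {r : Int} (hr : 0 ≤ r) {x : String} {T : List String}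
    (hx : x ∈ Lr r T) : x.toList.length = r.toNat := by
  unfold Lr at hx
  rw [List.mem_map] at hx
  obtain ⟨u, hu, rfl⟩ := hx
  rw [List.mem_filter] at hu
  have hlong := hu.2
  unfold longB at hlong
  simp only [decide_eq_true_eq] at hlong
  rw [pf_toList r u hr, List.length_take]
  omega

-- ---------- sortedness / contiguity ----------

lemma cons_le_cases {x y : Char} {a b : List Char} (h : (x :: a) ≤ (y :: b)) :
    x < y ∨ (x = y ∧ a ≤ b) := by
  rcases lt_or_eq_of_le h with h1 | h1
  · cases List.lex_lt.2 h1 with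
    | cons hlex => exact Or.inr ⟨rfl, le_of_lt (List.lex_lt.1 hlex)⟩
    | rel hr => exact Or.inl hr
  · injection h1 with h2 h3
    exact Or.inr ⟨h2, le_of_eq h3⟩

lemma lex3 : ∀ (r : Nat) (a b c : List Char), a ≤ b → b ≤ c →
    a.take r = c.take r → r ≤ a.length → r ≤ c.length →
    b.take r = a.take r ∧ r ≤ b.length := by
  intro r
  induction r with
  | zero => intro a b c _ _ _ _ _; simp
  | succ m ih =>
      intro a b c hab hbc htake ha hc
      obtain ⟨x, a', rfl⟩ : ∃ x a', a = x :: a' := by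
        cases a with
        | nil => simp at ha
        | cons x a' => exact ⟨x, a', rfl⟩
      obtain ⟨z, c', rfl⟩ : ∃ z c', c = z :: c' := by
        cases c with
        | nil => simp at hc
        | cons z c' => exact ⟨z, c', rfl⟩
      obtain ⟨y, b', rfl⟩ : ∃ y b', b = y :: b' := by
        cases b with
        | nil =>
            rcases lt_or_eq_of_le hab with h1 | h1
            · exact absurd (List.lex_lt.2 h1) (by intro hx; cases hx)
            · cases h1
        | cons y b' => exact ⟨y, b', rfl⟩
      simp only [List.take_succ_cons, List.cons.injEq] at htake
      obtain ⟨rfl, htake'⟩ := htake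
      have hab' := cons_le_cases hab
      have hbc' := cons_le_cases hbc
      simp only [List.length_cons] at ha hc ⊢
      have hkey : y = x ∧ a' ≤ b' ∧ b' ≤ c' := by
        rcases hab' with h1 | ⟨rfl, h1⟩
        · rcases hbc' with h2 | ⟨rfl, h2⟩
          · exact absurd (lt_trans h1 h2) (lt_irrefl x)
          · exact absurd h1 (lt_irrefl _)
        · rcases hbc' with h2 | ⟨heq, h2⟩
          · exact absurd h2 (lt_irrefl _)
          · exact ⟨rfl, h1, h2⟩
      obtain ⟨rfl, h1, h2⟩ := hkey
      obtain ⟨ht, hl⟩ := ih a' b' c' h1 h2 htake' (by omega) (by omega)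
      refine ⟨?_, by omega⟩
      simp [List.take_succ_cons, ht]

lemma dropWhile_all_false (r : Int) (hr : 1 ≤ r) (s : String) :
    ∀ (t : List String), (∀ u ∈ t, s ≤ u) → t.Pairwise (· ≤ ·) →
      ∀ u ∈ t.dropWhile (samePreB r s), samePreB r s u = false := by
  intro t
  induction t with
  | nil => simp
  | cons a t' ih =>
      intro hs hp
      rw [List.pairwise_cons] at hp
      by_cases ha : samePreB r s a = true
      · rw [List.dropWhile_cons_of_pos ha]
        exact ih (fun u hu => hs u (List.mem_cons_of_mem _ hu)) hp.2
      · rw [List.dropWhile_cons_of_neg ha]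
        have ha' : samePreB r s a = false := by
          rwa [Bool.not_eq_true] at ha
        intro u hu
        rcases List.mem_cons.1 hu with rfl | hu'
        · exact ha'
        · by_contra hcon
          have hrelu : samePreB r s u = true := by
            rwa [Bool.not_eq_false] at hcon
          rw [samePreB_iff] at hrelu
          obtain ⟨hls, hlu, hteq⟩ := hrelu
          have h1 : s.toList ≤ a.toList := String.le_iff_toList_le.1 (hs a (List.mem_cons_self ..))
          have h2 : a.toList ≤ u.toList := String.le_iff_toList_le.1 (hp.1 u hu')
          have hx := lex3 r.toNat s.toList a.toList u.toList h1 h2 hteq (by omega) (by omega)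
          have : samePreB r s a = true := by
            rw [samePreB_iff]
            exact ⟨hls, by omega, hx.1.symm⟩
          rw [this] at ha'
          cases ha'

-- ---------- SK combinatorics ----------

lemma SK_nil (K : Int) : SK K [] = 0 := rfl

lemma SK_perm (K : Int) {L L' : List String} (h : L.Perm L') : SK K L = SK K L' := by
  unfold SK
  have hperm : (PySem.Set.ofList L).Perm (PySem.Set.ofList L') :=
    (List.perm_ext_iff_of_nodup (PySem.Set.nodup_ofList L) (PySem.Set.nodup_ofList L')).2
      (fun a => by rw [PySem.Set.mem_ofList, PySem.Set.mem_ofList]; exact h.mem_iff)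
  calc ((PySem.Set.ofList L).map (fun k => contrib K (L.count k : Int))).sum
      = ((PySem.Set.ofList L).map (fun k => contrib K (L'.count k : Int))).sum := by
        exact congrArg _ (List.map_congr_left (fun a _ => by rw [h.count_eq]))
    _ = ((PySem.Set.ofList L').map (fun k => contrib K (L'.count k : Int))).sum :=
        (hperm.map _).sum_eq

lemma SK_append_disjoint (K : Int) (L1 L2 : List String)
    (h : ∀ x ∈ L1, x ∉ L2) : SK K (L1 ++ L2) = SK K L1 + SK K L2 := by
  unfold SK
  have hset : PySem.Set.ofList (L1 ++ L2) = PySem.Set.ofList L1 ++ PySem.Set.ofList L2 := by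
    rw [PySem.Set.ofList_append, PySem.Set.update_eq_append_filter]
    congr 1
    rw [List.filter_eq_self]
    intro a ha
    have ha2 : ¬ (PySem.Set.contains (PySem.Set.ofList L1) a = true) := by
      rw [PySem.Set.contains_iff, PySem.Set.mem_ofList]
      intro hmem
      exact h a hmem ((PySem.Set.mem_ofList _ _).1 ha)
    simp only [Bool.not_eq_true] at ha2
    rw [ha2]
    rfl
  have c1 : ∀ k ∈ PySem.Set.ofList L1, (L1 ++ L2).count k = L1.count k := by
    intro k hk
    have : k ∉ L2 := h k ((PySem.Set.mem_ofList _ _).1 hk)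
    rw [List.count_append, List.count_eq_zero.2 this]
    omega
  have c2 : ∀ k ∈ PySem.Set.ofList L2, (L1 ++ L2).count k = L2.count k := by
    intro k hk
    have hk2 : k ∈ L2 := (PySem.Set.mem_ofList _ _).1 hk
    have : k ∉ L1 := fun hk1 => h k hk1 hk2
    rw [List.count_append, List.count_eq_zero.2 this]
    omega
  have e1 : (PySem.Set.ofList L1).map (fun k => contrib K (((L1 ++ L2).count k : Nat) : Int))
      = (PySem.Set.ofList L1).map (fun k => contrib K ((L1.count k : Nat) : Int)) :=
    List.map_congr_left (fun k hk => by rw [c1 k hk])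
  have e2 : (PySem.Set.ofList L2).map (fun k => contrib K (((L1 ++ L2).count k : Nat) : Int))
      = (PySem.Set.ofList L2).map (fun k => contrib K ((L2.count k : Nat) : Int)) :=
    List.map_congr_left (fun k hk => by rw [c2 k hk])
  rw [hset, List.map_append, List.sum_append, e1, e2]

lemma Set_ofList_replicate (x : String) : ∀ (m : Nat),
    PySem.Set.ofList (List.replicate (m + 1) x) = [x] := by
  intro m
  induction m with
  | zero => rfl
  | succ k ihk =>
      rw [List.replicate_succ' (n := k + 1), PySem.Set.ofList_append_singleton, ihk,
        PySem.Set.add_of_mem (by simp)]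

lemma SK_replicate (K : Int) (m : Nat) (x : String) :
    SK K (List.replicate (m + 1) x) = contrib K ((m : Int) + 1) := by
  unfold SK
  rw [Set_ofList_replicate]
  simp [List.count_replicate]

-- ---------- grpSum = SK of the depth-r prefixes (sorted input) ----------

lemma grpSum_eq_SK (K r : Int) (hr : 1 ≤ r) :
    ∀ (T : List String), T.Pairwise (· ≤ ·) → grpSum K r T = SK K (Lr r T) := by
  suffices H : ∀ (n : Nat) (T : List String), T.length ≤ n → T.Pairwise (· ≤ ·) →
      grpSum K r T = SK K (Lr r T) by
    intro T; exact H T.length T le_rfl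
  intro n
  induction n with
  | zero =>
      intro T hT _
      obtain rfl : T = [] := List.eq_nil_of_length_eq_zero (Nat.le_zero.mp hT)
      rw [grpSum_nil]; rfl
  | succ n ih =>
      intro T hT hp
      match T with
      | [] => rw [grpSum_nil]; rfl
      | s :: t =>
          rw [grpSum_cons]
          rw [List.pairwise_cons] at hp
          obtain ⟨hs, hpt⟩ := hp
          by_cases hlong : longB r s = true
          · -- s has at least r characters
            have hwrel : ∀ u ∈ t.takeWhile (samePreB r s), samePreB r s u = true :=
              fun u hu => List.mem_takeWhile_imp hu
            have hdrel : ∀ u ∈ t.dropWhile (samePreB r s), samePreB r s u = false :=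
              dropWhile_all_false r hr s t hs hpt
            have htwd : t.takeWhile (samePreB r s) ++ t.dropWhile (samePreB r s) = t :=
              List.takeWhile_append_dropWhile
            -- decompose Lr
            have hLrw : Lr r (t.takeWhile (samePreB r s)) =
                List.replicate (t.takeWhile (samePreB r s)).length (pf r s) := by
              unfold Lr
              have hfw : (t.takeWhile (samePreB r s)).filter (longB r) =
                  t.takeWhile (samePreB r s) := by
                rw [List.filter_eq_self]
                intro u hu
                have := (samePreB_iff r s u).1 (hwrel u hu)
                unfold longB
                simp only [decide_eq_true_eq]
                exact this.2.1
              rw [hfw, List.eq_replicate_iff]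
              refine ⟨by simp, ?_⟩
              intro b hb
              rw [List.mem_map] at hb
              obtain ⟨u, hu, rfl⟩ := hb
              obtain ⟨h1, h2, h3⟩ := (samePreB_iff r s u).1 (hwrel u hu)
              rw [← String.toList_inj, pf_toList r u (by omega), pf_toList r s (by omega)]
              exact h3.symm
            have hpfnot : pf r s ∉ Lr r (t.dropWhile (samePreB r s)) := by
              intro hmem
              unfold Lr at hmem
              rw [List.mem_map] at hmem
              obtain ⟨u, hu, hpe⟩ := hmem
              rw [List.mem_filter] at hu
              have hlu : r ≤ (u.toList.length : Int) := by
                have := hu.2; unfold longB at this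
                simpa using this
              have hls : r ≤ (s.toList.length : Int) := by
                unfold longB at hlong; simpa using hlong
              have htk : u.toList.take r.toNat = s.toList.take r.toNat := by
                rw [← pf_toList r u (by omega), ← pf_toList r s (by omega), hpe]
              have : samePreB r s u = true := (samePreB_iff r s u).2 ⟨hls, hlu, htk.symm⟩
              rw [hdrel u hu.1] at this
              cases this
            have hsplit2 : Lr r t = Lr r (t.takeWhile (samePreB r s)) ++
                Lr r (t.dropWhile (samePreB r s)) := by
              conv_lhs => rw [← htwd]
              unfold Lr
              rw [List.filter_append, List.map_append]
            have hLr : Lr r (s :: t) =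
                (pf r s :: Lr r (t.takeWhile (samePreB r s))) ++
                  Lr r (t.dropWhile (samePreB r s)) := by
              have h0 : Lr r (s :: t) = pf r s :: Lr r t := by
                unfold Lr
                rw [List.filter_cons_of_pos hlong, List.map_cons]
              rw [h0, hsplit2]
              rfl
            rw [hLr, SK_append_disjoint K _ _ ?disj]
            case disj =>
              intro x hx
              rcases List.mem_cons.1 hx with rfl | hx'
              · exact hpfnot
              · rw [hLrw, List.mem_replicate] at hx'
                exact hx'.2 ▸ hpfnot
            have hrep : pf r s :: Lr r (t.takeWhile (samePreB r s)) =
                List.replicate ((t.takeWhile (samePreB r s)).length + 1) (pf r s) := by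
              rw [hLrw, List.replicate_succ]
            rw [hrep, SK_replicate]
            have hlen' : (t.dropWhile (samePreB r s)).length ≤ n := by
              have h1 := List.length_dropWhile_le (p := samePreB r s) (l := t)
              simp at hT; omega
            rw [ih _ hlen' (hpt.sublist (List.dropWhile_sublist _))]
          · -- s is too short: it is alone in its group and contributes no prefix
            have hlong' : longB r s = false := by rwa [Bool.not_eq_true] at hlong
            have hall : ∀ u, samePreB r s u = false := by
              intro u; unfold samePreB; rw [hlong']; simp
            have htw : t.takeWhile (samePreB r s) = [] := by
              cases t with
              | nil => rfl
              | cons a t' => rw [List.takeWhile_cons_of_neg (by simp [hall])]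
            have hdw : t.dropWhile (samePreB r s) = t := by
              cases t with
              | nil => rfl
              | cons a t' => rw [List.dropWhile_cons_of_neg (by simp [hall])]
            have hLr : Lr r (s :: t) = Lr r t := by
              unfold Lr
              rw [List.filter_cons_of_neg (by simp [hlong'] : ¬ longB r s = true)]
            rw [htw, hdw, hLr]
            simp only [List.length_nil]
            rw [ih t (by simp at hT; omega) hpt]
            simp [contrib_one]

-- ---------- summing SK over the depth range ----------

lemma SK_sum_range (K : Int) (T : List String) : ∀ (j : Nat),
    ((PySem.List.pyRange 1 (1 + (j : Int)) 1).map (fun r => SK K (Lr r T))).sum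
      = SK K ((PySem.List.pyRange 1 (1 + (j : Int)) 1).flatMap (fun r => Lr r T)) := by
  intro j
  induction j with
  | zero =>
      rw [PySem.List.pyRange_one_eq_nil (by omega)]
      simp [SK_nil]
  | succ k ihk =>
      have hsplit : PySem.List.pyRange 1 (1 + ((k : Nat) + 1 : Int)) 1
          = PySem.List.pyRange 1 (1 + (k : Int)) 1 ++ [1 + (k : Int)] := by
        have h := PySem.List.pyRange_one_succ_right (a := 1) (b := 1 + (k : Int)) (by omega)
        rw [show (1 + ((k : Nat) + 1 : Int)) = (1 + (k : Int)) + 1 by ring]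
        exact h
      rw [show ((k + 1 : Nat) : Int) = ((k : Nat) + 1 : Int) by push_cast; ring]
      rw [hsplit, List.map_append, List.sum_append, List.flatMap_append, ihk]
      simp only [List.map_cons, List.map_nil, List.sum_cons, List.sum_nil,
        List.flatMap_cons, List.flatMap_nil, List.append_nil]
      rw [SK_append_disjoint]
      · ring
      · intro x hx hx2
        rw [List.mem_flatMap] at hx
        obtain ⟨rr, hrr, hxr⟩ := hx
        rw [PySem.List.mem_pyRange_one] at hrr
        have l1 := mem_Lr_length (by omega) hxr
        have l2 := mem_Lr_length (r := 1 + (k : Int)) (by omega) hx2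
        omega

-- ---------- flatMap permutation juggling ----------

lemma filter_map_eq_flatMap {α β : Type} (p : α → Bool) (f : α → β) (l : List α) :
    (l.filter p).map f = l.flatMap (fun x => if p x then [f x] else []) := by
  induction l with
  | nil => rfl
  | cons a t ihl =>
      by_cases hpa : p a = true
      · simp [List.filter_cons_of_pos hpa, hpa, ihl]
      · have hfa : p a = false := by rwa [Bool.not_eq_true] at hpa
        rw [List.filter_cons_of_neg (by simp [hfa]), List.flatMap_cons, if_neg (by simp [hfa]),
          ihl, List.nil_append]

lemma flatMap_eq_map_of_singleton {α β : Type} (l : List α) (f : α → List β) (g : α → β)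
    (h : ∀ x ∈ l, f x = [g x]) : l.flatMap f = l.map g := by
  induction l with
  | nil => rfl
  | cons a t ihl =>
      rw [List.flatMap_cons, h a (List.mem_cons_self ..), List.map_cons,
        ihl (fun x hx => h x (List.mem_cons_of_mem _ hx))]
      rfl

lemma flatMap_append_distrib_perm {α β : Type} (A B : α → List β) :
    ∀ (T : List α), (T.flatMap (fun s => A s ++ B s)).Perm (T.flatMap A ++ T.flatMap B) := by
  intro T
  induction T with
  | nil => simp
  | cons s T' ihl =>
      simp only [List.flatMap_cons, List.append_assoc]
      refine (List.Perm.append_left (A s) ?_)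
      have h1 : (B s ++ (T'.flatMap A ++ T'.flatMap B)).Perm
          (T'.flatMap A ++ (B s ++ T'.flatMap B)) := by
        rw [← List.append_assoc, ← List.append_assoc]
        exact List.Perm.append_right _ List.perm_append_comm
      exact ((List.Perm.append_left (B s) ihl).trans h1)

lemma flatMap_comm_perm {α β γ : Type} (R : List α) (T : List β) (g : β → α → List γ) :
    (R.flatMap (fun r => T.flatMap (fun s => g s r))).Perm
      (T.flatMap (fun s => R.flatMap (fun r => g s r))) := by
  induction R with
  | nil =>
      have : T.flatMap (fun s => ([] : List γ)) = [] :=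
        List.flatMap_eq_nil_iff.2 (fun x _ => rfl)
      simp [this]
  | cons r R' ihR =>
      simp only [List.flatMap_cons]
      refine List.Perm.trans (List.Perm.append_left _ ihR) ?_
      exact (flatMap_append_distrib_perm (fun s => g s r) (fun s => R'.flatMap (g s)) T).symm

lemma flatMap_range_prefs (s : String) (M : Int) (hM : (s.toList.length : Int) ≤ M) :
    (PySem.List.pyRange 1 (M + 1) 1).flatMap (fun r => if longB r s then [pf r s] else [])
      = prefs s := by
  have hlen0 : (0 : Int) ≤ (s.toList.length : Int) := by positivity
  have hsplit := PySem.List.pyRange_one_append 1 ((s.toList.length : Int) + 1) (M + 1)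
    (by omega) (by omega)
  have hlen : PySem.Str.len s = (s.toList.length : Int) := PySem.Str.len_eq s
  rw [hsplit, List.flatMap_append]
  have h1 : (PySem.List.pyRange 1 ((s.toList.length : Int) + 1) 1).flatMap
      (fun r => if longB r s then [pf r s] else []) = prefs s := by
    rw [flatMap_eq_map_of_singleton _ _ (fun r => pf r s) ?hsing]
    · unfold prefs
      rw [hlen]
      rfl
    case hsing =>
      intro x hx
      rw [PySem.List.mem_pyRange_one] at hx
      have : longB x s = true := by
        unfold longB; simp only [decide_eq_true_eq]; omega
      rw [if_pos this]
  have h2 : (PySem.List.pyRange ((s.toList.length : Int) + 1) (M + 1) 1).flatMap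
      (fun r => if longB r s then [pf r s] else []) = [] := by
    rw [List.flatMap_eq_nil_iff]
    intro x hx
    rw [PySem.List.mem_pyRange_one] at hx
    have : longB x s = false := by
      unfold longB; simp only [decide_eq_false_iff_not]; omega
    rw [if_neg (by simp [this])]
  rw [h1, h2, List.append_nil]

-- ---------- max length ----------

def ML (T : List String) : Int := (T.map (fun s => (s.toList.length : Int))).foldl max 0

lemma ML_nonneg (T : List String) : 0 ≤ ML T := by
  unfold ML
  exact (PySem.List.le_foldl_max _ 0).1

lemma ML_ge (T : List String) (s : String) (hs : s ∈ T) : (s.toList.length : Int) ≤ ML T := by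
  unfold ML
  exact (PySem.List.le_foldl_max _ 0).2 _ (List.mem_map_of_mem hs)

lemma lcps_bound : ∀ (T : List String), ∀ x ∈ lcps T, ∃ a ∈ T, x ≤ (a.toList.length : Int)
  | a :: b :: t, x, hx => by
      have hd : lcps (a :: b :: t) = commonPrefix a b :: lcps (b :: t) := rfl
      rw [hd] at hx
      rcases List.mem_cons.1 hx with rfl | hx2
      · exact ⟨a, List.mem_cons_self .., cpAux_le_len a.toList b.toList⟩
      · obtain ⟨u, hu, hle⟩ := lcps_bound (b :: t) x hx2
        exact ⟨u, List.mem_cons_of_mem _ hu, hle⟩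

-- ---------- building the X array ----------

lemma X_build (S' : List String) : ∀ (m n : Nat), 1 ≤ m → m ≤ n → n ≤ S'.length →
    (PySem.List.pyRange 1 (m : Int) 1).foldl
      (fun A i => PySem.List.pySetD A i
        (commonPrefix (PySem.List.pyGetD S' (i - 1) "") (PySem.List.pyGetD S' i "")))
      (List.replicate (n + 1) (0 : Int))
    = 0 :: (lcps (S'.take m) ++ List.replicate (n + 1 - m) (0 : Int)) := by
  intro m
  induction m with
  | zero => intro n h1; exact absurd h1 (by omega)
  | succ k ihm =>
      intro n _ h2 h3
      by_cases hk : k = 0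
      · subst hk
        rw [PySem.List.pyRange_one_eq_nil (by norm_num), List.foldl_nil]
        have hl1 : lcps (S'.take 1) = [] := by
          cases S' with
          | nil => rfl
          | cons a t => rfl
        rw [hl1]
        simp [List.replicate_succ]
      · obtain ⟨j, rfl⟩ : ∃ j, k = j + 1 := ⟨k - 1, by omega⟩
        have hk1 : 1 ≤ j + 1 := by omega
        have hjlen : j + 1 < S'.length := by omega
        have hsplit : PySem.List.pyRange 1 ((j + 1 + 1 : Nat) : Int) 1
            = PySem.List.pyRange 1 ((j + 1 : Nat) : Int) 1 ++ [((j + 1 : Nat) : Int)] := by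
          have h := PySem.List.pyRange_one_succ_right (a := 1) (b := ((j + 1 : Nat) : Int))
            (by push_cast; omega)
          rw [show ((j + 1 + 1 : Nat) : Int) = ((j + 1 : Nat) : Int) + 1 by push_cast; ring]
          exact h
        rw [hsplit, List.foldl_append, ihm n hk1 (by omega) h3, List.foldl_cons, List.foldl_nil]
        have hg1 : PySem.List.pyGetD S' (((j + 1 : Nat) : Int) - 1) "" = S'[j]'(by omega) := by
          rw [show (((j + 1 : Nat) : Int) - 1) = ((j : Nat) : Int) by push_cast; ring,
            PySem.List.pyGetD_natCast]
          exact List.getD_eq_getElem _ _ (by omega)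
        have hg2 : PySem.List.pyGetD S' ((j + 1 : Nat) : Int) "" = S'[j + 1]'(by omega) := by
          rw [PySem.List.pyGetD_natCast]
          exact List.getD_eq_getElem _ _ (by omega)
        rw [hg1, hg2, PySem.List.pySetD_natCast]
        set v := commonPrefix (S'[j]'(by omega)) (S'[j + 1]'(by omega)) with hv
        have hlcklen : (lcps (S'.take (j + 1))).length = j := by
          rw [lcps_length]; simp [List.length_take]; omega
        have hrep1 : List.replicate (n + 1 - (j + 1)) (0 : Int)
            = 0 :: List.replicate (n + 1 - (j + 1 + 1)) (0 : Int) := by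
          rw [← List.replicate_succ]
          congr 1
          omega
        have htake : S'.take (j + 1 + 1) = S'.take (j + 1) ++ [S'[j + 1]'(by omega)] := by
          rw [List.take_succ]
          congr 1
          rw [List.getElem?_eq_getElem hjlen]
          rfl
        have htkne : S'.take (j + 1) ≠ [] := by
          have hlt : (S'.take (j + 1)).length = j + 1 := by simp [List.length_take]; omega
          intro hcon
          rw [hcon] at hlt
          simp at hlt
        have hlast : (S'.take (j + 1)).getLast htkne = S'[j]'(by omega) := by
          rw [List.getLast_eq_getElem]
          have hlt : (S'.take (j + 1)).length = j + 1 := by simp [List.length_take]; omega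
          rw [List.getElem_take]
          simp [hlt]
        have hlc : lcps (S'.take (j + 1 + 1)) = lcps (S'.take (j + 1)) ++ [v] := by
          rw [htake, lcps_append_singleton _ htkne, hlast]
        rw [hlc]
        rw [List.set_cons_succ, hrep1, List.set_append_right _ _ (by omega),
          show j - (lcps (S'.take (j + 1))).length = 0 by omega]
        simp [List.append_assoc]

-- ---------- assembly ----------

lemma foldl_contrib (K : Int) : ∀ (v : List Int) (acc : Int),
    v.foldl (fun a c => if 2 ≤ c then a + PySem.Int.floordiv c K else a) acc
      = acc + (v.map (contrib K)).sum := by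
  intro v
  induction v with
  | nil => intro acc; simp
  | cons c v' ihv =>
      intro acc
      rw [List.foldl_cons, List.map_cons, List.sum_cons]
      by_cases hc : 2 ≤ c
      · rw [if_pos hc, ihv, contrib_big K c hc]; ring
      · rw [if_neg hc, ihv, show contrib K c = 0 from by rw [contrib, if_neg hc]]; ring

lemma B_reduce (N K : Int) (S : List String) (hK1 : ¬ K = 1) (hN : 0 ≤ N) :
    solution_alt N K S = SK K (((PySem.List.sorted S id).take N.toNat).flatMap prefs) := by
  unfold solution_alt
  rw [if_neg hK1]
  rw [PySem.List.slice_to _ hN]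
  have hinner : ∀ (d : PySem.Dict String Int) (s : String),
      (PySem.List.pyRange 1 (PySem.Str.len s + 1) 1).foldl (fun d i =>
        d.insert (PySem.Str.slice s none (some i))
          (d.getD (PySem.Str.slice s none (some i)) 0 + 1)) d
      = (prefs s).foldl (fun d p => d.insert p (d.getD p 0 + 1)) d := by
    intro d s
    unfold prefs
    rw [List.foldl_map]
  simp only [hinner]
  rw [← List.foldl_flatMap, PySem.Dict.foldl_insert_getD_add_one_eq_counter]
  rw [foldl_contrib]
  unfold PySem.Dict.values
  rw [PySem.Dict.items_counter, List.map_map, List.map_map]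
  unfold SK
  rw [zero_add]
  exact congrArg List.sum (List.map_congr_left (fun k _ => rfl))

lemma A_zero (K : Int) (S : List String) (hK1 : ¬ K = 1) : solution 0 K S = 0 := by
  unfold solution
  rw [if_neg hK1]
  have h1 : PySem.List.pyRange 1 (0 : Int) 1 = [] := PySem.List.pyRange_one_eq_nil (by norm_num)
  have h2 : ((0 : Int) + 1).toNat = 1 := rfl
  have h3 : (PySem.List.max? (List.replicate 1 (0 : Int)) id).getD 0 = 0 := by decide
  have h4 : PySem.List.pyRange 1 ((0 : Int) + 1) 1 = [] := PySem.List.pyRange_one_eq_nil (by norm_num)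
  simp only [h1, h2, h3, h4, List.foldl_nil]

lemma lcps_nonneg : ∀ (T : List String), ∀ x ∈ lcps T, 0 ≤ x
  | a :: b :: t, x, hx => by
      have hd : lcps (a :: b :: t) = commonPrefix a b :: lcps (b :: t) := rfl
      rw [hd] at hx
      rcases List.mem_cons.1 hx with rfl | hx2
      · exact cpAux_nonneg a.toList b.toList
      · exact lcps_nonneg (b :: t) x hx2

lemma X_array (N : Int) (S : List String) (hN : 1 ≤ N)
    (hNlen : N ≤ (S.length : Int) ∨ N ≤ 1) :
    (PySem.List.pyRange 1 N 1).foldl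
      (fun A i => PySem.List.pySetD A i
        (commonPrefix (PySem.List.pyGetD (PySem.List.sorted S id) (i - 1) "")
          (PySem.List.pyGetD (PySem.List.sorted S id) i "")))
      (List.replicate (N + 1).toNat (0 : Int))
      = 0 :: (lcps ((PySem.List.sorted S id).take N.toNat) ++ [0]) := by
    by_cases hN1 : N = 1
    · subst hN1
      rw [PySem.List.pyRange_one_eq_nil (by norm_num), List.foldl_nil]
      have h2 : ((1 : Int) + 1).toNat = 2 := rfl
      rw [h2]
      have h3 : lcps ((PySem.List.sorted S id).take (1 : Int).toNat) = [] := by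
        cases PySem.List.sorted S id with
        | nil => rfl
        | cons a t => rfl
      rw [h3]
      rfl
    · have hN2 : 2 ≤ N := by omega
      have hlen2 : N ≤ (S.length : Int) := by
        rcases hNlen with h | h
        · exact h
        · omega
      have hlen3 : N.toNat ≤ (PySem.List.sorted S id).length := by
        rw [(PySem.List.sorted_perm S id false).length_eq]; omega
      have hc2 : (N + 1).toNat = N.toNat + 1 := by omega
      have hc1 : (N : Int) = ((N.toNat : Nat) : Int) := by omega
      rw [hc2, hc1]
      simp only [Int.toNat_natCast]
      have hX := X_build (PySem.List.sorted S id) N.toNat N.toNat (by omega) le_rfl hlen3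
      rw [hX]
      have h5 : N.toNat + 1 - N.toNat = 1 := by omega
      rw [h5]
      rfl

lemma A_main (N K : Int) (S : List String) (hK1 : ¬ K = 1) (hN : 1 ≤ N)
    (hNlen : N ≤ (S.length : Int) ∨ N ≤ 1) :
    solution N K S = SK K (((PySem.List.sorted S id).take N.toNat).flatMap prefs) := by
  have hlenS' : (PySem.List.sorted S id).length = S.length :=
    (PySem.List.sorted_perm S id false).length_eq
  have hXeq := X_array N S hN hNlen
  -- T and its facts
  have hpw : ((PySem.List.sorted S id).take N.toNat).Pairwise (· ≤ ·) := by
    have h := PySem.List.sorted_pairwise S id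
    exact h.sublist (List.take_sublist ..)
  have hTlen : ((0 :: (lcps ((PySem.List.sorted S id).take N.toNat) ++ [0])).length : Int)
      = N + 1 := by
    have h1 := lcps_length ((PySem.List.sorted S id).take N.toNat)
    have h2 : ((PySem.List.sorted S id).take N.toNat).length
        = min N.toNat (PySem.List.sorted S id).length := by
      simp [List.length_take]
    have h4 : (0 :: (lcps ((PySem.List.sorted S id).take N.toNat) ++ [0])).length
        = (lcps ((PySem.List.sorted S id).take N.toNat)).length + 2 := by simp
    rw [h4, h1]
    rw [hlenS'] at h2
    by_cases hN1 : N = 1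
    · subst hN1
      omega
    · have hlen2 : N ≤ (S.length : Int) := by
        rcases hNlen with h | h
        · exact h
        · omega
      omega
  -- unfold A and rewrite the X array
  unfold solution
  rw [if_neg hK1]
  simp only [hXeq]
  set T := (PySem.List.sorted S id).take N.toNat with hTdef
  set X : List Int := 0 :: (lcps T ++ [0]) with hXdef
  -- maxRank facts
  obtain ⟨mv, hmv⟩ : ∃ mv, PySem.List.max? X id = some mv := by
    cases h : PySem.List.max? X id with
    | none =>
        rw [PySem.List.max?_eq_none_iff] at h
        exact absurd h (by simp [hXdef])
    | some mv => exact ⟨mv, rfl⟩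
  have hmax := PySem.List.max?_isMax hmv
  have hMRv : (PySem.List.max? X id).getD 0 = mv := by rw [hmv]; rfl
  have hMR0 : 0 ≤ mv := hmax 0 (by simp [hXdef])
  have hub : ∀ x ∈ lcps T, x ≤ mv := by
    intro x hx
    exact hmax x (by rw [hXdef]; exact List.mem_cons_of_mem _ (List.mem_append_left _ hx))
  have hMRml : mv ≤ ML T := by
    have hmvmem := PySem.List.max?_mem hmv
    rw [hXdef] at hmvmem
    rcases List.mem_cons.1 hmvmem with rfl | h2
    · exact ML_nonneg T
    · rcases List.mem_append.1 h2 with h3 | h3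
      · obtain ⟨a, ha, hle⟩ := lcps_bound T mv h3
        exact le_trans hle (ML_ge T a ha)
      · simp at h3
        rw [h3]
        exact ML_nonneg T
  -- inner fold = machine
  have hfun : (fun (score rank : Int) =>
      ((PySem.List.pyRange 1 (N + 1) 1).foldl
        (fun (st : Int × Int × Int) idx =>
          if st.2.2 = 0 then
            (if rank ≤ PySem.List.pyGetD X idx 0 then (st.1, 2, 1) else (st.1, st.2.1, 0))
          else
            (if rank ≤ PySem.List.pyGetD X idx 0 then (st.1, st.2.1 + 1, 1)
             else (st.1 + PySem.Int.floordiv st.2.1 K, st.2.1, 0)))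
        (score, 0, 0)).1)
      = fun (score rank : Int) => score + machRec K rank none (lcps T ++ [0]) := by
    funext score rank
    have hb : (N + 1 : Int) = (X.length : Int) := by rw [hTlen]
    rw [hb]
    rw [PySem.List.foldl_pyRange_pyGetD' X 0
      (fun (st : Int × Int × Int) (x : Int) =>
        if st.2.2 = 0 then
          (if rank ≤ x then (st.1, 2, 1) else (st.1, st.2.1, 0))
        else
          (if rank ≤ x then (st.1, st.2.1 + 1, 1)
           else (st.1 + PySem.Int.floordiv st.2.1 K, st.2.1, 0)))
      ((score, 0, 0) : Int × Int × Int) (by norm_num)]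
    have hdrop : X.drop (1 : Int).toNat = lcps T ++ [0] := by rw [hXdef]; rfl
    rw [hdrop]
    exact (fold_mach K rank _ (fun st x => rfl) (lcps T ++ [0])).1 score 0
  rw [hMRv, hfun, PySem.List.foldl_add, zero_add]
  -- machine = grpSum on each rank
  rw [List.map_congr_left (fun rank hrk => machRec_eq_grpSum K rank
    (by rw [PySem.List.mem_pyRange_one] at hrk; omega) T)]
  -- extend the rank range to ML T
  have hsplit := PySem.List.pyRange_one_append 1 (mv + 1) (ML T + 1) (by omega) (by omega)
  have hzero : ((PySem.List.pyRange (mv + 1) (ML T + 1) 1).map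
      (fun rank => grpSum K rank T)).sum = 0 := by
    apply List.sum_eq_zero
    intro x hx
    rw [List.mem_map] at hx
    obtain ⟨rank, hrk, rfl⟩ := hx
    rw [PySem.List.mem_pyRange_one] at hrk
    exact grpSum_zero K rank (by omega) T (fun y hy => by have := hub y hy; omega)
  have hext : ((PySem.List.pyRange 1 (ML T + 1) 1).map (fun rank => grpSum K rank T)).sum
      = ((PySem.List.pyRange 1 (mv + 1) 1).map (fun rank => grpSum K rank T)).sum := by
    rw [hsplit, List.map_append, List.sum_append, hzero, add_zero]
  rw [← hext]
  -- grpSum = SK of the depth-r prefixes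
  rw [List.map_congr_left (fun r hr => grpSum_eq_SK K r
    (by rw [PySem.List.mem_pyRange_one] at hr; omega) T hpw)]
  -- merge the per-depth sums into one SK
  have hMLc : ML T + 1 = 1 + (((ML T).toNat : Nat) : Int) := by
    have := ML_nonneg T; omega
  rw [hMLc, SK_sum_range K T (ML T).toNat, ← hMLc]
  -- permute into per-string prefix streams
  have hLrflat : ∀ r : Int, Lr r T = T.flatMap (fun s => if longB r s then [pf r s] else []) := by
    intro r
    unfold Lr
    exact filter_map_eq_flatMap (longB r) (pf r) T
  rw [List.flatMap_congr (fun r _ => hLrflat r)]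
  rw [SK_perm K (flatMap_comm_perm (PySem.List.pyRange 1 (ML T + 1) 1) T
    (fun s r => if longB r s then [pf r s] else []))]
  rw [List.flatMap_congr (fun s hs => flatMap_range_prefs s (ML T) (ML_ge T s hs))]

-- ===== VERDICT (by name: the statement is the Claim_ definition above) =====
theorem solution_spec : Claim_equal_solution := by
  unfold Claim_equal_solution
  intro N K S _ hpre
  unfold Spec_solution
  by_cases hK1 : K = 1
  · subst hK1
    rfl
  · obtain ⟨hN0, hNlen, -⟩ : 0 ≤ N ∧ (N ≤ (S.length : Int) ∨ N ≤ 1) ∧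
        (K ≠ 0 ∨ (((PySem.List.sorted S id).take N.toNat).filterMap (fun s => s.toList.head?)).Nodup) := by
      rcases hpre with h | h
      · exact absurd h hK1
      · exact h
    rw [B_reduce N K S hK1 hN0]
    by_cases hN1 : N = 0
    · subst hN1
      rw [A_zero K S hK1]
      rfl
    · exact A_main N K S hK1 (by omega) hNlen
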